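-- pv_equiv track=rewrite | github.com/AnilBK/ANIL | lexer.py | get_escaped_length
-- ===== SOURCE A (Python) =====
-- def get_escaped_length(line):
--     """
--     Returns the length of the string considering escape sequences.
--     Escape sequences are counted as 1 character each, not their literal representations.
--     """
--
--     """
--     Escape sequences such as \n are not encoded as a single character '\n', but as two independent
--     characters '\','n' because when we output the string, the '\n' will be converted to a new line and,
--     an extra line will be added to the generated output file. We don't want this.
--     That's why we have this representation.
--     However, the actual length of the string should be the escaped length.
--     """
--
--     length = 0
--     i = 0
--     while i < len(line):
--         if line[i] == '\\' and i + 1 < len(line):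
--             # If an escape sequence is detected, we just count the escape character and the next one
--             length += 1
--             i += 2  # Skip the next character as it's part of the escape sequence
--         else:
--             length += 1
--             i += 1
--     return length
-- ===== SOURCE B (Python) =====
-- def get_escaped_length(line):
--     # Run-arithmetic: start from len(line) and subtract one per greedy escape
--     # pair; a run of k backslashes followed by a character absorbs k//2 + k%2
--     # pairs, a trailing run only k//2.
--     length = len(line)
--     run = 0
--     for ch in line:
--         if ch == '\\':
--             run += 1
--         else:
--             length -= run // 2 + run % 2
--             run = 0
--     return length - run // 2
-- ===== Notes on version B (the rewrite author's own statement) =====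
-- stated objective: faster
-- what changed: Replaces the index-stepping while loop (i += 2 to skip escape pairs) with a single for-each pass that only tracks the current backslash-run length and subtracts floor/parity arithmetic per run from len(line).
import Mathlib
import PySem

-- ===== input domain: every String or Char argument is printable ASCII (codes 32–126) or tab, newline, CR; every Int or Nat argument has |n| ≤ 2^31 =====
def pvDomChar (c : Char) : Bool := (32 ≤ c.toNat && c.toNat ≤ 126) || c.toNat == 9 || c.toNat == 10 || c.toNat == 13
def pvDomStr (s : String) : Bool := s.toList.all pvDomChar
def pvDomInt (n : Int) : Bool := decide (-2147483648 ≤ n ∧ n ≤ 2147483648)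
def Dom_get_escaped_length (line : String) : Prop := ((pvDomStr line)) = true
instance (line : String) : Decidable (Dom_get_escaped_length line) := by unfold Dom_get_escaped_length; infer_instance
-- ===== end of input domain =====

-- B changes the algorithm: a run-length/arithmetic pass instead of A's index-stepping scan; return value only, same complexity.

-- ===== PORT A =====
-- A's while loop: step by 2 past a backslash that has a successor, else by 1, counting 1 each time.
def pvALoop (acc : Int) : List Char → Int
  | [] => acc
  | c :: rest =>
    if c = '\\' ∧ rest ≠ [] then pvALoop (acc + 1) rest.tail
    else pvALoop (acc + 1) rest
termination_by l => l.length
decreasing_by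
  all_goals simp [List.length_tail]

def get_escaped_length (line : String) : Int := pvALoop 0 line.toList

-- ===== PORT B =====
-- B's loop body: extend the backslash run, or flush it with run//2 + run%2 subtracted.
def pvStep (st : Int × Int) (ch : Char) : Int × Int :=
  if ch = '\\' then (st.1, st.2 + 1)
  else (st.1 - (PySem.Int.floordiv st.2 2 + PySem.Int.mod st.2 2), 0)

def get_escaped_length_alt (line : String) : Int :=
  let p := line.toList.foldl pvStep ((line.toList.length : Int), 0)
  p.1 - PySem.Int.floordiv p.2 2

-- ===== PRECONDITION & SPEC =====
def Spec_get_escaped_length (line : String) (out : Int) : Prop := out = get_escaped_length_alt line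
instance (line : String) (out : Int) : Decidable (Spec_get_escaped_length line out) := by unfold Spec_get_escaped_length; infer_instance

-- ===== CLAIM (what is proved, stated in full; the proofs are below) =====
def Claim_equal_get_escaped_length : Prop := ∀ (line : String), Dom_get_escaped_length line → Spec_get_escaped_length line (get_escaped_length line)

-- ===== LEMMAS AND PROOFS =====

-- Total greedy-pair reduction of a run of r backslashes followed by l.
def redN : Nat → List Char → Int
  | r, [] => ((r / 2 : Nat) : Int)
  | r, c :: l => if c = '\\' then redN (r + 1) l else ((r / 2 + r % 2 : Nat) : Int) + redN 0 l

lemma redN_step (l : List Char) : ∀ r : Nat, redN (r + 2) l = 1 + redN r l := by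
  induction l with
  | nil =>
    intro r
    simp only [redN]
    have h : (r + 2) / 2 = r / 2 + 1 := by omega
    simp [h]
    omega
  | cons c l ih =>
    intro r
    by_cases hc : c = '\\'
    · simpa [redN, hc] using ih (r + 1)
    · have h : (r + 2) / 2 + (r + 2) % 2 = 1 + (r / 2 + r % 2) := by omega
      simp only [redN, hc, if_neg hc, h]
      push_cast
      ring

lemma foldB_char (l : List Char) : ∀ (L : Int) (r : Nat),
    (l.foldl pvStep (L, (r : Int))).1 - PySem.Int.floordiv (l.foldl pvStep (L, (r : Int))).2 2
      = L - redN r l := by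
  induction l with
  | nil => intro L r; simp [redN]
  | cons c l ih =>
    intro L r
    by_cases hc : c = '\\'
    · simpa [pvStep, hc, redN] using ih L (r + 1)
    · rw [List.foldl_cons]
      have hstep : pvStep (L, (r : Int)) c = (L - ((r / 2 + r % 2 : Nat) : Int), ((0 : Nat) : Int)) := by
        simp [pvStep, hc]
      rw [hstep, ih]
      have hr : redN r (c :: l) = ((r / 2 + r % 2 : Nat) : Int) + redN 0 l := by
        simp [redN, hc]
      rw [hr]
      ring

lemma aLoop_main : ∀ (n : Nat) (l : List Char) (r : Nat) (acc : Int),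
    2 * l.length + r = n →
    pvALoop acc (List.replicate r '\\' ++ l) = acc + ((r : Int) + l.length) - redN r l := by
  intro n
  induction n using Nat.strong_induction_on with
  | _ n ih =>
    intro l r acc hm
    match r, l with
    | 0, [] => simp [pvALoop, redN]
    | 0, c :: l' =>
      simp only [List.length_cons] at hm
      by_cases hc : c = '\\'
      · have h := ih (2 * l'.length + 1) (by omega) l' 1 acc (by ring)
        subst hc
        have e1 : List.replicate 0 '\\' ++ ('\\' :: l') = List.replicate 1 '\\' ++ l' := by simp
        rw [e1, h]
        simp [redN, List.length_cons]
        push_cast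
        ring
      · have h := ih (2 * l'.length) (by omega) l' 0 (acc + 1) (by ring)
        simp only [List.replicate, List.nil_append] at h ⊢
        rw [pvALoop]
        split_ifs with hif
        · exact absurd hif.1 hc
        · rw [h]
          simp [redN, hc, List.length_cons]
          push_cast
          ring
    | 1, [] =>
      simp [pvALoop, redN]
    | 1, c :: l' =>
      simp only [List.length_cons] at hm
      have h := ih (2 * l'.length) (by omega) l' 0 (acc + 1) (by ring)
      simp only [List.replicate, List.nil_append] at h
      have e : List.replicate 1 '\\' ++ (c :: l') = '\\' :: c :: l' := by simp
      rw [e, pvALoop]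
      split_ifs with hif
      · rw [List.tail_cons, h]
        by_cases hc : c = '\\'
        · subst hc
          have h1 : redN 1 ('\\' :: l') = redN 2 l' := by simp [redN]
          have h2 := redN_step l' 0
          simp only [Nat.zero_add] at h2
          rw [h1, h2]
          simp [List.length_cons]
          push_cast
          ring
        · simp [redN, hc, List.length_cons]
          push_cast
          ring
      · exact absurd ⟨rfl, by simp⟩ hif
    | (r' + 2), l =>
      have h := ih (2 * l.length + r') (by omega) l r' (acc + 1) (by ring)
      have e : List.replicate (r' + 2) '\\' ++ l = '\\' :: '\\' :: (List.replicate r' '\\' ++ l) := by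
        simp [List.replicate]
      rw [e, pvALoop]
      split_ifs with hif
      · rw [List.tail_cons, h, redN_step l r']
        push_cast
        ring
      · exact absurd ⟨rfl, by simp⟩ hif

-- ===== VERDICT (by name: the statement is the Claim_ definition above) =====
theorem get_escaped_length_spec : Claim_equal_get_escaped_length := by
  intro line _
  unfold Spec_get_escaped_length get_escaped_length get_escaped_length_alt
  have hA := aLoop_main (2 * line.toList.length) line.toList 0 0 (by ring)
  simp only [List.replicate, List.nil_append] at hA
  have hB := foldB_char line.toList (line.toList.length : Int) 0
  simp only [Nat.cast_zero] at hB
  rw [hA]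
  rw [hB]
  ring
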